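-- pv_equiv track=rewrite | github.com/Aru-gxtx/Scrapy-Web-Scraping-DE-BUYER | populate_de_buyer_xlsx.py | record_from_json_entry
-- ===== SOURCE A (Python) =====
-- from typing import Any, Dict, Iterable, List, Optional, Tuple
--
-- JSON_KEY_ALIASES = {
--     "item_no": ["item_no", "item_no.", "Item No."],
--     "mfr_catalog_no": ["mfr_catalog_no", "mfr_catalog_no.", "Mfr Catalog No."],
--     "brand_name": ["brand_name", "brand", "Brand Name"],
--     "item_description": ["item_description", "description", "name", "Item Description"],
--     "image_link": ["image_link", "Image Link"],
--     "overview": ["overview", "Overview"],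
--     "length": ["length", "Length"],
--     "width": ["width", "Width"],
--     "height": ["height", "Height"],
--     "volume": ["volume", "Volume"],
--     "diameter": ["diameter", "Diameter"],
--     "color": ["color", "Color"],
--     "material": ["material", "Material"],
--     "ean_code": ["ean_code", "EAN Code"],
--     "pattern": ["pattern", "Pattern"],
--     "barcode": ["barcode", "Barcode"],
--     "product_url": ["product_url", "url", "Product URL"],
--     "price": ["price", "Price"],
-- }
--
-- def clean_cell_value(value: Any) -> Any:
--     if isinstance(value, str):
--         value = value.strip()
--         return value if value != "" else None
--     return value
--
-- def first_non_empty(record: Dict[str, Any], keys: List[str]) -> Any: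
--     for key in keys:
--         if key in record:
--             value = clean_cell_value(record.get(key))
--             if value is not None:
--                 return value
--     return None
--
-- def record_from_json_entry(entry: Dict[str, Any], source_file: str) -> Dict[str, Any]:
--     record: Dict[str, Any] = {}
--     for field, aliases in JSON_KEY_ALIASES.items():
--         record[field] = first_non_empty(entry, aliases)
--     if record.get("brand_name") is None and record.get("item_description"):
--         record["brand_name"] = "de Buyer"
--     record["source_file"] = source_file
--     return record
-- ===== SOURCE B (Python) =====
-- from typing import Any, Dict
--
-- JSON_KEY_ALIASES = {
--     "item_no": ["item_no", "item_no.", "Item No."],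
--     "mfr_catalog_no": ["mfr_catalog_no", "mfr_catalog_no.", "Mfr Catalog No."],
--     "brand_name": ["brand_name", "brand", "Brand Name"],
--     "item_description": ["item_description", "description", "name", "Item Description"],
--     "image_link": ["image_link", "Image Link"],
--     "overview": ["overview", "Overview"],
--     "length": ["length", "Length"],
--     "width": ["width", "Width"],
--     "height": ["height", "Height"],
--     "volume": ["volume", "Volume"],
--     "diameter": ["diameter", "Diameter"],
--     "color": ["color", "Color"],
--     "material": ["material", "Material"],
--     "ean_code": ["ean_code", "EAN Code"],
--     "pattern": ["pattern", "Pattern"],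
--     "barcode": ["barcode", "Barcode"],
--     "product_url": ["product_url", "url", "Product URL"],
--     "price": ["price", "Price"],
-- }
--
-- def clean_cell_value(value: Any) -> Any:
--     if isinstance(value, str):
--         value = value.strip()
--         return value if value != "" else None
--     return value
--
-- # reverse index: alias -> (field, priority of the alias within the field's list)
-- _ALIAS_INDEX = {alias: (field, i)
--                 for field, aliases in JSON_KEY_ALIASES.items()
--                 for i, alias in enumerate(aliases)}
--
-- def record_from_json_entry(entry: Dict[str, Any], source_file: str) -> Dict[str, Any]:
--     # one pass over the entry, keeping per field the value of the lowest-priority-index alias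
--     best: Dict[str, Any] = {}
--     for key, raw in entry.items():
--         hit = _ALIAS_INDEX.get(key)
--         if hit is None:
--             continue
--         field, idx = hit
--         value = clean_cell_value(raw)
--         if value is not None and (field not in best or idx < best[field][0]):
--             best[field] = (idx, value)
--     record = {field: (best[field][1] if field in best else None)
--               for field in JSON_KEY_ALIASES}
--     if record["brand_name"] is None and record["item_description"]:
--         record["brand_name"] = "de Buyer"
--     record["source_file"] = source_file
--     return record
-- ===== Notes on version B (the rewrite author's own statement) =====
-- stated objective: alternative
-- what changed: Replaces the per-field scan over alias lists (first_non_empty probing each of the 42 aliases against the entry) by a reverse index alias->(field,priority) built once and a single pass over the entry items keeping, per field, the value of the lowest-priority alias; Pre_ excludes association lists with duplicate keys, which cannot arise from a Python dict.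
import Mathlib
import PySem

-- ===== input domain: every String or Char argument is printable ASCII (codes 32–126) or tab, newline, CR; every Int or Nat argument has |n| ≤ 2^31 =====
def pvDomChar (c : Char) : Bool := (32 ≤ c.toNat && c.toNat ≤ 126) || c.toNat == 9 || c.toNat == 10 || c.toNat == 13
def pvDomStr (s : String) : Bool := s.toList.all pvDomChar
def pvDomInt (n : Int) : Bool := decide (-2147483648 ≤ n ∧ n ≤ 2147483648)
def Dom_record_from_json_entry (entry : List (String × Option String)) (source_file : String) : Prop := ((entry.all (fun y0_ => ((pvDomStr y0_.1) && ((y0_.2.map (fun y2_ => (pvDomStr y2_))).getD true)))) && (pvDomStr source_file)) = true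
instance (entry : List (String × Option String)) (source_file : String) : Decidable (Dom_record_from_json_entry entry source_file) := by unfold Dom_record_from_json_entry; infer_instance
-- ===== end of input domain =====

set_option maxRecDepth 400000

-- B replaces A's per-field scan over alias lists by a reverse index alias->(field,priority)
-- and a single pass over the entry (objective: alternative decomposition, same cost).

-- ===== PORT A =====
def JSON_KEY_ALIASES : List (String × List String) :=
  [("item_no", ["item_no", "item_no.", "Item No."]),
   ("mfr_catalog_no", ["mfr_catalog_no", "mfr_catalog_no.", "Mfr Catalog No."]),
   ("brand_name", ["brand_name", "brand", "Brand Name"]),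
   ("item_description", ["item_description", "description", "name", "Item Description"]),
   ("image_link", ["image_link", "Image Link"]),
   ("overview", ["overview", "Overview"]),
   ("length", ["length", "Length"]),
   ("width", ["width", "Width"]),
   ("height", ["height", "Height"]),
   ("volume", ["volume", "Volume"]),
   ("diameter", ["diameter", "Diameter"]),
   ("color", ["color", "Color"]),
   ("material", ["material", "Material"]),
   ("ean_code", ["ean_code", "EAN Code"]),
   ("pattern", ["pattern", "Pattern"]),
   ("barcode", ["barcode", "Barcode"]),
   ("product_url", ["product_url", "url", "Product URL"]),
   ("price", ["price", "Price"])]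

-- clean_cell_value: values here are Optional[str]; a None passes through, a str is stripped ('' -> None)
def cleanCell (v : Option String) : Option String :=
  match v with
  | some s => let t := PySem.Str.strip s; if t = "" then none else some t
  | none => none

-- truthiness of record.get("item_description"): None and "" are falsy
def pyTruthy (v : Option String) : Bool :=
  match v with
  | some s => s != ""
  | none => false

-- first_non_empty: 'key in record' + 'record.get(key)' as one Dict.get? match
def firstNonEmpty (entry : List (String × Option String)) : List String → Option String
  | [] => none
  | k :: ks =>
    match (PySem.Dict.mk entry).get? k with
    | some v =>
      match cleanCell v with
      | some x => some x
      | none => firstNonEmpty entry ks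
    | none => firstNonEmpty entry ks

def record_from_json_entry (entry : List (String × Option String)) (source_file : String) : List (String × Option String) :=
  let record : PySem.Dict String (Option String) :=
    JSON_KEY_ALIASES.foldl (fun r p => r.insert p.1 (firstNonEmpty entry p.2)) (PySem.Dict.mk [])
  let record :=
    if (PySem.Dict.getD record "brand_name" none == none) && pyTruthy (PySem.Dict.getD record "item_description" none)
    then record.insert "brand_name" (some "de Buyer") else record
  (record.insert "source_file" (some source_file)).items

-- ===== PORT B =====
-- _ALIAS_INDEX = {alias: (field, i) for field, aliases in JSON_KEY_ALIASES.items() for i, alias in enumerate(aliases)}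
def ALIAS_INDEX : PySem.Dict String (String × Int) :=
  PySem.Dict.ofList
    (JSON_KEY_ALIASES.flatMap (fun p => (PySem.List.enumerate p.2).map (fun q => (q.2, (p.1, q.1)))))

-- one iteration of B's single pass over entry.items()
def bestStep (best : PySem.Dict String (Int × String)) (kv : String × Option String) : PySem.Dict String (Int × String) :=
  match ALIAS_INDEX.get? kv.1 with
  | none => best
  | some fi =>
    match cleanCell kv.2 with
    | none => best
    | some x =>
      if (match best.get? fi.1 with | none => true | some p => decide (fi.2 < p.1))
      then best.insert fi.1 (fi.2, x) else best

def record_from_json_entry_alt (entry : List (String × Option String)) (source_file : String) : List (String × Option String) :=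
  let best : PySem.Dict String (Int × String) := entry.foldl bestStep (PySem.Dict.mk [])
  let record : PySem.Dict String (Option String) :=
    JSON_KEY_ALIASES.foldl
      (fun r p => r.insert p.1 (match best.get? p.1 with | some q => some q.2 | none => none))
      (PySem.Dict.mk [])
  let record :=
    if (PySem.Dict.getD record "brand_name" none == none) && pyTruthy (PySem.Dict.getD record "item_description" none)
    then record.insert "brand_name" (some "de Buyer") else record
  (record.insert "source_file" (some source_file)).items

-- ===== PRECONDITION & SPEC =====
-- Pre_ excludes association lists with duplicate keys, which cannot arise from a Python dict
-- (on such lists A reads only the first value of a key while B's pass would also see the later ones).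
def Pre_record_from_json_entry (entry : List (String × Option String)) (source_file : String) : Prop :=
  (entry.map Prod.fst).Nodup
instance (entry : List (String × Option String)) (source_file : String) : Decidable (Pre_record_from_json_entry entry source_file) := by unfold Pre_record_from_json_entry; infer_instance

def pvWitness_record_from_json_entry : (List (String × Option String)) × String :=
  ([("brand", some "  X "), ("name", some "pan"), ("zz", none)], "f.json")

def Spec_record_from_json_entry (entry : List (String × Option String)) (source_file : String) (out : List (String × Option String)) : Prop := out = record_from_json_entry_alt entry source_file
instance (entry : List (String × Option String)) (source_file : String) (out : List (String × Option String)) : Decidable (Spec_record_from_json_entry entry source_file out) := by unfold Spec_record_from_json_entry; infer_instance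

-- ===== CLAIM (what is proved, stated in full; the proofs are below) =====
def Claim_equal_record_from_json_entry : Prop := ∀ (entry : List (String × Option String)) (source_file : String), Dom_record_from_json_entry entry source_file → Pre_record_from_json_entry entry source_file → Spec_record_from_json_entry entry source_file (record_from_json_entry entry source_file)

-- ===== LEMMAS AND PROOFS =====

-- best candidate so far: pvMerge keeps the lower alias index, ties keep the left (earlier) one
def pvMerge (x y : Option (Int × String)) : Option (Int × String) :=
  match x, y with
  | none, y => y
  | some p, none => some p
  | some p, some q => if q.1 < p.1 then some q else some p

-- position of k in the alias list as
def pvPos (as : List String) (k : String) : Option Int :=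
  match as with
  | [] => none
  | a :: as' => if k == a then some 0 else (pvPos as' k).map (· + 1)

def pvCand (as : List String) (kv : String × Option String) : Option (Int × String) :=
  match pvPos as kv.1 with
  | none => none
  | some i =>
    match cleanCell kv.2 with
    | none => none
    | some x => some (i, x)

def pvStep (as : List String) (st : Option (Int × String)) (kv : String × Option String) : Option (Int × String) :=
  pvMerge st (pvCand as kv)

def pvM (as : List String) (l : List (String × Option String)) : Option (Int × String) :=
  l.foldl (pvStep as) none

def pvShift (x : Option (Int × String)) : Option (Int × String) :=
  x.map (fun p => (p.1 + 1, p.2))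

-- the single-field shadow of bestStep
def pvStepF (f : String) (st : Option (Int × String)) (kv : String × Option String) : Option (Int × String) :=
  match ALIAS_INDEX.get? kv.1 with
  | none => st
  | some fi =>
    if fi.1 == f then
      match cleanCell kv.2 with
      | none => st
      | some x =>
        if (match st with | none => true | some p => decide (fi.2 < p.1)) then some (fi.2, x) else st
    else st

theorem pvMerge_none_right (x : Option (Int × String)) : pvMerge x none = x := by
  cases x <;> rfl

theorem pvMerge_assoc (x y z : Option (Int × String)) :
    pvMerge (pvMerge x y) z = pvMerge x (pvMerge y z) := by
  rcases x with _ | p <;> rcases y with _ | q <;> rcases z with _ | r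
  · rfl
  · rfl
  · rfl
  · rfl
  · rfl
  · rfl
  · rw [pvMerge_none_right, pvMerge_none_right]
  · show pvMerge (if q.1 < p.1 then some q else some p) (some r)
        = pvMerge (some p) (if r.1 < q.1 then some r else some q)
    by_cases h1 : q.1 < p.1 <;> by_cases h2 : r.1 < q.1 <;>
      simp only [h1, h2, if_true, if_false, pvMerge] <;> split_ifs <;>
      first | rfl | (exfalso; omega)

theorem pvMerge_shift (x y : Option (Int × String)) :
    pvMerge (pvShift x) (pvShift y) = pvShift (pvMerge x y) := by
  rcases x with _ | p <;> rcases y with _ | q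
  · rfl
  · rfl
  · rfl
  · show pvMerge (some (p.1 + 1, p.2)) (some (q.1 + 1, q.2))
        = pvShift (if q.1 < p.1 then some q else some p)
    by_cases h : q.1 < p.1 <;>
      simp only [h, if_true, if_false, pvMerge, pvShift, Option.map_some] <;>
      split_ifs <;> first | rfl | (exfalso; omega)

theorem pvM_cons_merge (as : List String) (kv : String × Option String)
    (l : List (String × Option String)) :
    pvM as (kv :: l) = pvMerge (pvCand as kv) (pvM as l) := by
  have key : ∀ (l : List (String × Option String)) (st : Option (Int × String)),
      l.foldl (pvStep as) st = pvMerge st (pvM as l) := by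
    intro l
    induction l with
    | nil => intro st; simp [pvM, pvMerge_none_right]
    | cons kv l ih =>
      intro st
      have h1 : pvM as (kv :: l) = pvMerge (pvCand as kv) (pvM as l) := by
        show List.foldl (pvStep as) (pvStep as none kv) l = _
        rw [ih (pvStep as none kv)]; rfl
      show List.foldl (pvStep as) (pvStep as st kv) l = _
      rw [ih (pvStep as st kv), h1, pvStep, pvMerge_assoc]
  show List.foldl (pvStep as) (pvStep as none kv) l = _
  rw [key l (pvStep as none kv)]; rfl

theorem pvPos_nonneg (as : List String) (k : String) :
    ∀ i, pvPos as k = some i → 0 ≤ i := by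
  induction as with
  | nil => intro i h; cases h
  | cons a as' ih =>
    intro i h
    simp only [pvPos] at h
    split_ifs at h with ha
    · cases h; omega
    · rcases Option.map_eq_some_iff.mp h with ⟨j, hj, rfl⟩
      have := ih j hj; omega

theorem pvCand_nonneg (as : List String) (kv : String × Option String) :
    ∀ p, pvCand as kv = some p → 0 ≤ p.1 := by
  intro p h
  simp only [pvCand] at h
  rcases hp : pvPos as kv.1 with _ | i <;> rw [hp] at h
  · cases h
  · rcases hc : cleanCell kv.2 with _ | x <;> rw [hc] at h
    · cases h
    · cases h; exact pvPos_nonneg as kv.1 i hp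

theorem pvM_nonneg (as : List String) (l : List (String × Option String)) :
    ∀ p, pvM as l = some p → 0 ≤ p.1 := by
  induction l with
  | nil => intro p h; cases h
  | cons kv l ih =>
    intro p h
    rw [pvM_cons_merge] at h
    rcases hc : pvCand as kv with _ | c <;> rcases hm : pvM as l with _ | m <;>
      rw [hc, hm] at h <;> simp only [pvMerge] at h
    · cases h
    · cases h; exact ih _ hm
    · cases h; exact pvCand_nonneg as kv _ hc
    · split_ifs at h <;> cases h
      · exact ih _ hm
      · exact pvCand_nonneg as kv _ hc

theorem pvPos_eq_none_of_not_mem (as : List String) (k : String) (h : k ∉ as) : pvPos as k = none := by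
  induction as with
  | nil => rfl
  | cons a as' ih =>
    simp only [List.mem_cons, not_or] at h
    simp [pvPos, h.1, ih h.2]

theorem pvCand_cons_ne (a : String) (as : List String) (kv : String × Option String) (h : kv.1 ≠ a) :
    pvCand (a :: as) kv = pvShift (pvCand as kv) := by
  simp only [pvCand, pvPos, beq_iff_eq, if_neg h]
  cases hp : pvPos as kv.1 <;> cases hc : cleanCell kv.2 <;> simp [pvShift]

theorem pvM_cons_alias (a : String) (as : List String) (l : List (String × Option String))
    (h : a ∉ l.map Prod.fst) : pvM (a :: as) l = pvShift (pvM as l) := by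
  induction l with
  | nil => rfl
  | cons kv l ih =>
    simp only [List.map_cons, List.mem_cons, not_or] at h
    rw [pvM_cons_merge, pvM_cons_merge, ih h.2, pvCand_cons_ne a as kv (Ne.symm h.1), pvMerge_shift]

theorem pvM_nil_aliases (l : List (String × Option String)) : pvM [] l = none := by
  induction l with
  | nil => rfl
  | cons kv l ih => rw [pvM_cons_merge, ih]; rfl

theorem pvM_cons (a : String) (as : List String) (l : List (String × Option String))
    (hnd : (l.map Prod.fst).Nodup) (hna : a ∉ as) :
    pvM (a :: as) l =
      match ((PySem.Dict.mk l).get? a).bind cleanCell with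
      | some x => some (0, x)
      | none => pvShift (pvM as l) := by
  induction l with
  | nil => rfl
  | cons kv l ih =>
    simp only [List.map_cons, List.nodup_cons] at hnd
    rw [pvM_cons_merge]
    by_cases hka : kv.1 = a
    · -- this pair is the unique occurrence of alias a in the entry
      have hget : (PySem.Dict.mk (kv :: l)).get? a = some kv.2 := by
        rw [show (kv :: l) = ((kv.1, kv.2) :: l) from rfl, PySem.Dict.get?_mk_cons]
        simp [hka]
      have hrest : pvM (a :: as) l = pvShift (pvM as l) :=
        pvM_cons_alias a as l (by rw [← hka]; exact hnd.1)
      have hMas : pvM as (kv :: l) = pvM as l := by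
        rw [pvM_cons_merge,
          show pvCand as kv = none by
            simp [pvCand, pvPos_eq_none_of_not_mem as kv.1 (by rw [hka]; exact hna)]]
        rfl
      rw [hget, hrest, hMas]
      cases hc : cleanCell kv.2 with
      | none =>
        rw [show pvCand (a :: as) kv = none by simp [pvCand, pvPos, hka, hc]]
        simp only [Option.bind_some, hc]
        rfl
      | some x =>
        rw [show pvCand (a :: as) kv = some (0, x) by simp [pvCand, pvPos, hka, hc]]
        simp only [Option.bind_some, hc]
        rcases hm : pvM as l with _ | p
        · rfl
        · have : (0 : Int) ≤ p.1 := pvM_nonneg as l p hm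
          simp [pvShift, pvMerge, show ¬(p.1 + 1 < 0) by omega]
    · have hget : (PySem.Dict.mk (kv :: l)).get? a = (PySem.Dict.mk l).get? a := by
        rw [show (kv :: l) = ((kv.1, kv.2) :: l) from rfl, PySem.Dict.get?_mk_cons]
        simp [hka]
      rw [hget, ih hnd.2, pvCand_cons_ne a as kv hka]
      rw [pvM_cons_merge]
      cases hb : ((PySem.Dict.mk l).get? a).bind cleanCell with
      | some x =>
        rcases hc : pvCand as kv with _ | p
        · rfl
        · have : (0 : Int) ≤ p.1 := pvCand_nonneg as kv p hc
          simp [pvShift, pvMerge, show (0 : Int) < p.1 + 1 by omega]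
      | none => rw [pvMerge_shift]

theorem firstNonEmpty_eq_pvM (entry : List (String × Option String))
    (hnd : (entry.map Prod.fst).Nodup) :
    ∀ as : List String, as.Nodup →
      firstNonEmpty entry as = (pvM as entry).map Prod.snd := by
  intro as
  induction as with
  | nil => intro _; simp [firstNonEmpty, pvM_nil_aliases]
  | cons a as' ih =>
    intro hndas
    simp only [List.nodup_cons] at hndas
    rw [show firstNonEmpty entry (a :: as') =
        (match (PySem.Dict.mk entry).get? a with
         | some v => match cleanCell v with
                     | some x => some x
                     | none => firstNonEmpty entry as'
         | none => firstNonEmpty entry as') from rfl]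
    rw [pvM_cons a as' entry hnd hndas.1, ih hndas.2]
    cases hg : (PySem.Dict.mk entry).get? a with
    | none => simp only [Option.bind_none]; simp [pvShift, Option.map_map]; rfl
    | some v =>
      cases hc : cleanCell v with
      | none => simp only [Option.bind_some, hc]; simp [pvShift, Option.map_map]; rfl
      | some x => simp only [Option.bind_some, hc]; rfl

-- the reverse index agrees with the position function, field by field
def pvHit (f : String) (k : String) : Option Int :=
  match ALIAS_INDEX.get? k with
  | none => none
  | some fi => if fi.1 == f then some fi.2 else none

theorem pvHit_mem : ∀ p ∈ JSON_KEY_ALIASES, ∀ k ∈ ALIAS_INDEX.keys, pvHit p.1 k = pvPos p.2 k := by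
  decide

theorem pv_alias_sub : ∀ p ∈ JSON_KEY_ALIASES, ∀ x ∈ p.2, x ∈ ALIAS_INDEX.keys := by
  decide

theorem pv_alias_nodup : ∀ p ∈ JSON_KEY_ALIASES, p.2.Nodup := by
  decide

theorem pvHit_eq (p : String × List String) (hmem : p ∈ JSON_KEY_ALIASES) (k : String) :
    pvHit p.1 k = pvPos p.2 k := by
  by_cases hk : k ∈ ALIAS_INDEX.keys
  · exact pvHit_mem p hmem k hk
  · have h1 : ALIAS_INDEX.get? k = none :=
      (PySem.Dict.get?_eq_none_iff_not_mem_keys ALIAS_INDEX k).mpr hk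
    have h2 : pvPos p.2 k = none :=
      pvPos_eq_none_of_not_mem p.2 k (fun hin => hk (pv_alias_sub p hmem k hin))
    simp [pvHit, h1, h2]

theorem pvStepF_eq_pvStep (p : String × List String) (hmem : p ∈ JSON_KEY_ALIASES)
    (st : Option (Int × String)) (kv : String × Option String) :
    pvStepF p.1 st kv = pvStep p.2 st kv := by
  have hb := pvHit_eq p hmem kv.1
  unfold pvHit at hb
  cases hg : ALIAS_INDEX.get? kv.1 with
  | none =>
    rw [hg] at hb
    simp only [pvStepF, pvStep, pvCand, hg, ← hb, pvMerge_none_right]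
  | some fi =>
    rw [hg] at hb
    simp only [pvStepF, pvStep, pvCand, hg, ← hb]
    by_cases hf : fi.1 = p.1
    · simp only [hf, beq_self_eq_true, if_true]
      cases hc : cleanCell kv.2 with
      | none => rw [pvMerge_none_right]
      | some x =>
        cases st with
        | none => rfl
        | some q =>
          simp only [pvMerge]
          split_ifs <;> simp_all
    · have hbf : (fi.1 == p.1) = false := by simpa using hf
      simp only [hbf, Bool.false_eq_true, if_false, pvMerge_none_right]

-- projection of the best-dict fold onto a single field
theorem pv_proj (f : String) : ∀ (l : List (String × Option String)) (best : PySem.Dict String (Int × String)),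
    (l.foldl bestStep best).get? f = l.foldl (pvStepF f) (best.get? f) := by
  intro l
  induction l with
  | nil => intro best; rfl
  | cons kv l ih =>
    intro best
    show (List.foldl bestStep (bestStep best kv) l).get? f = List.foldl (pvStepF f) (pvStepF f (best.get? f) kv) l
    rw [ih (bestStep best kv)]
    congr 1
    cases hg : ALIAS_INDEX.get? kv.1 with
    | none => unfold bestStep pvStepF; rw [hg]
    | some fi =>
      unfold bestStep pvStepF
      rw [hg]
      cases hc : cleanCell kv.2 with
      | none => simp
      | some x =>
        by_cases hf : fi.1 = f
        · subst hf
          simp only [beq_self_eq_true, if_true]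
          split_ifs
          · exact PySem.Dict.get?_insert_self best fi.1 (fi.2, x)
          · rfl
        · have hbf : (fi.1 == f) = false := by simpa using hf
          simp only [hbf, Bool.false_eq_true, if_false]
          split_ifs
          · exact PySem.Dict.get?_insert_of_ne best (fi.2, x) (fun h => hf h.symm)
          · rfl

-- per-field agreement of the two record values
theorem pv_field (p : String × List String) (hmem : p ∈ JSON_KEY_ALIASES)
    (entry : List (String × Option String)) (hnd : (entry.map Prod.fst).Nodup) :
    (match (entry.foldl bestStep (PySem.Dict.mk [])).get? p.1 with
     | some q => some q.2
     | none => none) = firstNonEmpty entry p.2 := by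
  have h1 : (entry.foldl bestStep (PySem.Dict.mk ([] : List (String × (Int × String))))).get? p.1
      = entry.foldl (pvStepF p.1) none := pv_proj p.1 entry (PySem.Dict.mk [])
  have h2 : entry.foldl (pvStepF p.1) none = pvM p.2 entry := by
    rw [pvM, show pvStepF p.1 = pvStep p.2 from
      funext fun st => funext fun kv => pvStepF_eq_pvStep p hmem st kv]
  rw [h1, h2, firstNonEmpty_eq_pvM entry hnd p.2 (pv_alias_nodup p hmem)]
  cases pvM p.2 entry with
  | none => rfl
  | some q => rfl

-- ===== VERDICT (by name: the statement is the Claim_ definition above) =====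
theorem record_from_json_entry_spec : Claim_equal_record_from_json_entry := by
  intro entry source_file _dom pre
  unfold Spec_record_from_json_entry record_from_json_entry record_from_json_entry_alt
  have hrec :
      JSON_KEY_ALIASES.foldl (fun r p => r.insert p.1 (firstNonEmpty entry p.2))
        (PySem.Dict.mk ([] : List (String × Option String)))
      = JSON_KEY_ALIASES.foldl
          (fun r p => r.insert p.1
            (match (entry.foldl bestStep (PySem.Dict.mk [])).get? p.1 with
             | some q => some q.2 | none => none))
          (PySem.Dict.mk ([] : List (String × Option String))) := by
    apply PySem.List.foldl_congr_mem
    intro acc p hp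
    rw [pv_field p hp entry pre]
  rw [hrec]
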